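-- pv_equiv track=rewrite | github.com/siddartha19/investormate | investormate/data/constants.py | is_valid_ticker
-- ===== SOURCE A (Python) =====
-- def is_valid_ticker(ticker: str) -> bool:
--     """
--     Basic ticker validation.
--
--     Args:
--         ticker: Stock ticker symbol
--
--     Returns:
--         True if ticker appears valid, False otherwise
--     """
--     if not ticker or not isinstance(ticker, str):
--         return False
--
--     # Basic checks
--     ticker = ticker.strip()
--     if len(ticker) < 1 or len(ticker) > 10:
--         return False
--
--     # Should be alphanumeric with possible dash, dot, or ampersand
--     allowed_chars = set("ABCDEFGHIJKLMNOPQRSTUVWXYZ0123456789-._&")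
--     return all(c.upper() in allowed_chars for c in ticker)
-- ===== SOURCE B (Python) =====
-- import re
--
-- _TICKER_RE = re.compile(r'[A-Za-z0-9._\-&]{1,10}\Z')
--
-- def is_valid_ticker(ticker: str) -> bool:
--     """Validate a ticker with one compiled regex instead of a length check plus a per-char loop."""
--     if not ticker or not isinstance(ticker, str):
--         return False
--     return _TICKER_RE.match(ticker.strip()) is not None
-- ===== Notes on version B (the rewrite author's own statement) =====
-- stated objective: idiomatic
-- what changed: The length check plus the per-character upper()-membership loop over an allowed-chars set is replaced by a single compiled regex full match whose character class and {1,10} quantifier do both jobs at once.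
import Mathlib
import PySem

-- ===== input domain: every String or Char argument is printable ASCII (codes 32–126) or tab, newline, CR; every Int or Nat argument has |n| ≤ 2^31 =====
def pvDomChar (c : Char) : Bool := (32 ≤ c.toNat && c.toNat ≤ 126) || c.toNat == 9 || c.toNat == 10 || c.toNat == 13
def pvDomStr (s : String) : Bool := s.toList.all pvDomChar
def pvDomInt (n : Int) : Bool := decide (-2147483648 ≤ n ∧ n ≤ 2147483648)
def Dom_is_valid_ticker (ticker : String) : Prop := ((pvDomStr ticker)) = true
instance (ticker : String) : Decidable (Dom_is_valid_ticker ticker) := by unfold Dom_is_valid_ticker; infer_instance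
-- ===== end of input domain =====

-- B validates the stripped string with one regex full match instead of A's length check + per-char loop; same return value on the ASCII domain.

-- ===== PORT A =====
-- allowed_chars = set("ABCDEFGHIJKLMNOPQRSTUVWXYZ0123456789-._&")
def allowed_chars : List Char := PySem.Set.ofList "ABCDEFGHIJKLMNOPQRSTUVWXYZ0123456789-._&".toList

def is_valid_ticker (ticker : String) : Bool :=
  if ticker = "" then false           -- 'not ticker'
  else
    let t := PySem.Str.strip ticker
    if t.toList.length < 1 || t.toList.length > 10 then false
    else t.toList.all (fun c => allowed_chars.contains (PySem.Chars.upperChar c))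

-- ===== PORT B =====
-- the regex character class [A-Za-z0-9._\-&]
def tickerClassChar (c : Char) : Bool :=
  ('A' ≤ c && c ≤ 'Z') || ('a' ≤ c && c ≤ 'z') || ('0' ≤ c && c ≤ '9') ||
  c == '.' || c == '_' || c == '-' || c == '&'

-- full match of [A-Za-z0-9._\-&]{1,10}: every char in the class, between 1 and 10 of them
def tickerFullmatch (cs : List Char) : Bool :=
  1 ≤ cs.length && cs.length ≤ 10 && cs.all tickerClassChar

def is_valid_ticker_alt (ticker : String) : Bool :=
  if ticker = "" then false
  else tickerFullmatch (PySem.Str.strip ticker).toList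

-- ===== PRECONDITION & SPEC =====
def Spec_is_valid_ticker (ticker : String) (out : Bool) : Prop := out = is_valid_ticker_alt ticker
instance (ticker : String) (out : Bool) : Decidable (Spec_is_valid_ticker ticker out) := by unfold Spec_is_valid_ticker; infer_instance

-- ===== CLAIM (what is proved, stated in full; the proofs are below) =====
def Claim_equal_is_valid_ticker : Prop := ∀ (ticker : String), Dom_is_valid_ticker ticker → Spec_is_valid_ticker ticker (is_valid_ticker ticker)

-- ===== LEMMAS AND PROOFS =====

-- per-character agreement on the ASCII domain, checked exhaustively over the 128 codes
theorem charTest_eq (c : Char) (h : pvDomChar c = true) :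
    allowed_chars.contains (PySem.Chars.upperChar c) = tickerClassChar c := by
  have hlt : c.toNat < 128 := by
    unfold pvDomChar at h
    simp only [Bool.or_eq_true, Bool.and_eq_true, decide_eq_true_eq, beq_iff_eq] at h
    omega
  have hall : ∀ n : Fin 128,
      allowed_chars.contains (PySem.Chars.upperChar (Char.ofNat n)) =
        tickerClassChar (Char.ofNat n) := by
    set_option maxRecDepth 20000 in decide
  have := hall ⟨c.toNat, hlt⟩
  simpa [Char.ofNat_toNat] using this

theorem strip_mem_dom (ticker : String) (h : pvDomStr ticker = true) :
    ∀ c ∈ (PySem.Str.strip ticker).toList, pvDomChar c = true := by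
  intro c hc
  rw [PySem.Str.toList_strip] at hc
  simp only [PySem.Chars.strip, PySem.Chars.lstrip, PySem.Chars.rstrip,
    List.mem_reverse] at hc
  have hc2 := (List.dropWhile_sublist _).subset hc
  rw [List.mem_reverse] at hc2
  have hc3 := (List.dropWhile_sublist _).subset hc2
  simp only [pvDomStr, List.all_eq_true] at h
  exact h c hc3

-- ===== VERDICT (by name: the statement is the Claim_ definition above) =====
theorem is_valid_ticker_spec : Claim_equal_is_valid_ticker := by
  intro ticker hdom
  unfold Spec_is_valid_ticker is_valid_ticker is_valid_ticker_alt tickerFullmatch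
  by_cases he : ticker = ""
  · simp [he]
  · simp only [he, ite_false]
    have hchars := strip_mem_dom ticker hdom
    have hall : (PySem.Str.strip ticker).toList.all
        (fun c => allowed_chars.contains (PySem.Chars.upperChar c)) =
        (PySem.Str.strip ticker).toList.all tickerClassChar := by
      rw [Bool.eq_iff_iff]
      simp only [List.all_eq_true]
      constructor <;> intro h c hc
      · rw [← charTest_eq c (hchars c hc)]; exact h c hc
      · rw [charTest_eq c (hchars c hc)]; exact h c hc
    set n := (PySem.Str.strip ticker).toList.length with hn
    by_cases hc : (n < 1 || n > 10) = true
    · rw [if_pos hc]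
      simp only [Bool.or_eq_true, decide_eq_true_eq] at hc
      simp only [Bool.false_eq, Bool.and_eq_false_iff]
      left
      rcases hc with hc | hc
      · left; simp only [decide_eq_false_iff_not]; omega
      · right; simp only [decide_eq_false_iff_not]; omega
    · rw [if_neg hc, hall]
      simp only [Bool.or_eq_true, decide_eq_true_eq, not_or] at hc
      have h1 : 1 ≤ n := by omega
      have h2 : n ≤ 10 := by omega
      simp [h1, h2]
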